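-- pv_equiv track=rewrite | github.com/Ashiq-am/Data-Structures-Algorithm | 1.Python Algorithms/4.Graph Algoithms/1.Introduction, DFS and BFS/37.Maximum product of two non-intersecting paths in a tree/program.py | dfs
-- ===== SOURCE A (Python) =====
-- def dfs(g, curMax, u, v):
--     # To find lengths of first and second maximum
--     # in subtrees. currMax is to store overall
--     # maximum.
--     max1 = 0
--     max2 = 0
--     total = 0
--
--     # loop through all neighbors of u
--     for i in range(len(g[u])):
--
--         # if neighbor is v, then skip it
--         if (g[u][i] == v):
--             continue
--
--         # call recursively with current neighbor as root
--         total = max(total, dfs(g, curMax, g[u][i], u))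
--
--         # get max from one side and update
--         if (curMax[0] > max1):
--             max2 = max1
--             max1 = curMax[0]
--         else:
--             max2 = max(max2, curMax[0])
--
--     # store total length by adding max
--     # and second max
--     total = max(total, max1 + max2)
--
--     # update current max by adding 1, i.e.
--     # current node is included
--     curMax[0] = max1 + 1
--     return total
-- ===== SOURCE B (Python) =====
-- def dfs(g, curMax, u, v):
--     # Staged decomposition: first recurse on every non-parent neighbor and record
--     # (returned total, reported depth) pairs; only afterwards aggregate: the best
--     # child total, and the two largest depths chosen by a descending sort.
--     results = [(dfs(g, curMax, w, u), curMax[0]) for w in g[u] if w != v]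
--     best = 0
--     for r, _ in results:
--         best = max(best, r)
--     depths = sorted((d for _, d in results), reverse=True)
--     d1 = depths[0] if depths else 0
--     d2 = depths[1] if len(depths) > 1 else 0
--     curMax[0] = d1 + 1
--     return max(best, d1 + d2)
-- ===== Notes on version B (the rewrite author's own statement) =====
-- stated objective: alternative
-- what changed: A streams max1/max2/total updates inside one loop; B stages the work: it first builds the list of (child total, child depth) pairs from the non-parent neighbors, then aggregates afterwards - a max fold for the totals and a descending sort to pick the two largest depths (0-padded); the side-effect contract curMax[0] = best depth + 1 is kept.
import Mathlib
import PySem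

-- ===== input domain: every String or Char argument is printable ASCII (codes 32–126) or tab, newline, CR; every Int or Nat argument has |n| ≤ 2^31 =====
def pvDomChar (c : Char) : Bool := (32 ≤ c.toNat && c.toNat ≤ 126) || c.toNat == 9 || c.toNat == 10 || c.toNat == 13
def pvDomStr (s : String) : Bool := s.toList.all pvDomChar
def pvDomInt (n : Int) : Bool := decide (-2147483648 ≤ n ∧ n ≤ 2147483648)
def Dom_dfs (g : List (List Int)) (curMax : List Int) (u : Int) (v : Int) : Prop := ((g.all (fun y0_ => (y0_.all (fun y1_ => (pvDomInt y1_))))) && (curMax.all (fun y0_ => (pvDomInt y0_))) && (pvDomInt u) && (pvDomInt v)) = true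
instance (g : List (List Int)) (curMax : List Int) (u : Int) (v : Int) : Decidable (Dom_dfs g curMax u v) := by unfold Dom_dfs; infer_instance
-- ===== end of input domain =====

-- B stages the work A streams: it first collects the (child total, child depth) pairs of all
-- non-parent neighbors, then aggregates — a max fold for totals, a descending sort for the two
-- largest depths (objective: alternative decomposition, same cost).
-- Both Pythons mutate curMax[0] in place identically; the equivalence proved here is about the
-- RETURN value only. The return value never depends on the caller's curMax: curMax[0] is
-- always written by a recursive call before it is read.

-- ===== PORT A =====
-- Fuel device (totality only): the recursion depth of the Python is bounded by the number of
-- distinct (node, parent) states, which is < pvBound g whenever the traversal terminates.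
def pvBound (g : List (List Int)) : Nat := (g.flatten.length + 2) * (g.flatten.length + 2) + 1

-- loop body of A: skip the parent v, recurse (f), fold total and the running top-two (max1, max2)
-- (f w).1 is the call's returned total, (f w).2 the curMax[0] it sets
def stepA (f : Int → Int × Int) (v : Int) (st : Int × Int × Int) (w : Int) : Int × Int × Int :=
  if w = v then st
  else if st.1 < (f w).2 then ((f w).2, st.1, max st.2.2 (f w).1)
  else (st.1, max st.2.1 (f w).2, max st.2.2 (f w).1)

-- state (max1, max2, total); `for i in range(len(g[u]))` reads exactly the elements of g[u] in order
def dfsA (g : List (List Int)) : Nat → Int → Int → Int × Int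
  | 0, _, _ => (0, 1)
  | k+1, u, v =>
    let st := ((PySem.List.pyGet? g u).getD []).foldl (stepA (fun w => dfsA g k w u) v) (0, 0, 0)
    (max st.2.2 (st.1 + st.2.1), st.1 + 1)

def dfs (g : List (List Int)) (curMax : List Int) (u : Int) (v : Int) : Int :=
  (dfsA g (pvBound g) u v).1

-- ===== PORT B =====
-- first the comprehension `results`, then the aggregation passes over it
def dfsB (g : List (List Int)) : Nat → Int → Int → Int × Int
  | 0, _, _ => (0, 1)
  | k+1, u, v =>
    let results := (((PySem.List.pyGet? g u).getD []).filter (fun w => w ≠ v)).map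
      (fun w => dfsB g k w u)
    let best := (results.map Prod.fst).foldl max 0
    let depths := PySem.List.sorted (results.map Prod.snd) (fun x => x) true
    let d1 := depths.headD 0
    let d2 := (depths.drop 1).headD 0
    (max best (d1 + d2), d1 + 1)

def dfs_alt (g : List (List Int)) (curMax : List Int) (u : Int) (v : Int) : Int :=
  (dfsB g (pvBound g) u v).1

-- ===== PRECONDITION & SPEC =====
-- successor states of the traversal: from state (x, p) Python recurses into (w, x) for every
-- w ∈ g[x] with w ≠ p (g[x] with Python's negative-index wrap)
def pvSuccs (g : List (List Int)) (s : Int × Int) : List (Int × Int) :=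
  ((PySem.List.pyGet? g s.1).getD []).filterMap (fun w => if w = s.2 then none else some (w, s.1))

def pvGrow (g : List (List Int)) (acc : List (Int × Int)) : List (Int × Int) :=
  (acc ++ acc.flatMap (pvSuccs g)).dedup

-- closure of the successor relation (stops at a fixpoint; pvBound g bounds the state count)
def pvClose (g : List (List Int)) : Nat → List (Int × Int) → List (Int × Int)
  | 0, acc => acc
  | k+1, acc => if (pvGrow g acc).length = acc.length then acc else pvClose g k (pvGrow g acc)

-- Pre_ excludes exactly the inputs on which the Python A raises: empty curMax (IndexError on
-- the write curMax[0] = max1 + 1), a reachable (node, parent) state whose node is not a valid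
-- index into g (IndexError), or a cycle among the reachable states (infinite recursion).
def Pre_dfs (g : List (List Int)) (curMax : List Int) (u : Int) (v : Int) : Prop :=
  curMax ≠ [] ∧
  ((pvClose g (pvBound g) [(u, v)]).all (fun s =>
      (PySem.List.pyGet? g s.1).isSome && !((pvClose g (pvBound g) (pvSuccs g s)).contains s))) = true
instance (g : List (List Int)) (curMax : List Int) (u : Int) (v : Int) : Decidable (Pre_dfs g curMax u v) := by unfold Pre_dfs; infer_instance

def pvWitness_dfs : List (List Int) × List Int × Int × Int := ([[1], [0]], [0], 0, 1)

def Spec_dfs (g : List (List Int)) (curMax : List Int) (u : Int) (v : Int) (out : Int) : Prop := out = dfs_alt g curMax u v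
instance (g : List (List Int)) (curMax : List Int) (u : Int) (v : Int) (out : Int) : Decidable (Spec_dfs g curMax u v out) := by unfold Spec_dfs; infer_instance

-- ===== CLAIM (what is proved, stated in full; the proofs are below) =====
def Claim_equal_dfs : Prop := ∀ (g : List (List Int)) (curMax : List Int) (u : Int) (v : Int), Dom_dfs g curMax u v → Pre_dfs g curMax u v → Spec_dfs g curMax u v (dfs g curMax u v)

-- ===== LEMMAS AND PROOFS =====
-- abbreviation for B's selection pass: sorted descending
def pvSrt (ds : List Int) : List Int := PySem.List.sorted ds (fun x => x) true

-- A's running max1 never drops below 0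
lemma foldA_fst_nonneg (f : Int → Int × Int) (v : Int) (h : ∀ w, 1 ≤ (f w).2) :
    ∀ (row : List Int) (st : Int × Int × Int), 0 ≤ st.1 → 0 ≤ (row.foldl (stepA f v) st).1 := by
  intro row
  induction row with
  | nil => intro st hst; simpa using hst
  | cons w row ih =>
    intro st hst
    simp only [List.foldl_cons]
    apply ih
    unfold stepA
    split_ifs with h1 h2
    · exact hst
    · exact le_trans (by norm_num) (h w)
    · exact hst

-- every call of A reports a depth curMax[0] = max1 + 1 ≥ 1
lemma dfsA_snd_pos (g : List (List Int)) : ∀ (k : Nat) (u v : Int), 1 ≤ (dfsA g k u v).2 := by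
  intro k
  induction k with
  | zero => intro u v; simp [dfsA]
  | succ k ih =>
    intro u v
    simp only [dfsA]
    have := foldA_fst_nonneg (fun w => dfsA g k w u) v (fun w => ih w u)
      ((PySem.List.pyGet? g u).getD []) (0, 0, 0) (by norm_num)
    omega

-- appending one element to the list B sorts = one descending insertion
lemma srt_snoc (ds : List Int) (c : Int) :
    pvSrt (ds ++ [c]) = PySem.List.insertBy (fun a b => decide (b < a)) c (pvSrt ds) := by
  unfold pvSrt
  rw [PySem.List.sorted_rev_eq_foldl_insertBy, PySem.List.sorted_rev_eq_foldl_insertBy,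
    List.foldl_append]
  rfl

-- first two elements (0-padded) of a descending insertion = A's (max1, max2) update
lemma ins_pair (c : Int) (hc : 1 ≤ c) (l : List Int) :
    ((PySem.List.insertBy (fun a b => decide (b < a)) c l).headD 0,
     ((PySem.List.insertBy (fun a b => decide (b < a)) c l).drop 1).headD 0)
    = if l.headD 0 < c then (c, l.headD 0)
      else (l.headD 0, max ((l.drop 1).headD 0) c) := by
  match l with
  | [] =>
    simp [PySem.List.insertBy]
    omega
  | [a] =>
    simp only [PySem.List.insertBy]
    split_ifs with h1 h2 <;> simp_all <;> omega
  | a :: b :: t =>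
    simp only [PySem.List.insertBy]
    split_ifs with h1 h2 <;> simp_all <;> omega

-- A's single streaming pass = B's staged passes over the same row: A's state is
-- (top-two of the collected depths, max-fold of the collected totals)
lemma fold_rel (f : Int → Int × Int) (v : Int) (h : ∀ w, 1 ≤ (f w).2) :
    ∀ (row : List Int) (tot : Int) (ds : List Int),
      row.foldl (stepA f v) ((pvSrt ds).headD 0, ((pvSrt ds).drop 1).headD 0, tot)
        = ((pvSrt (ds ++ (row.filter (fun w => w ≠ v)).map (fun w => (f w).2))).headD 0,
           ((pvSrt (ds ++ (row.filter (fun w => w ≠ v)).map (fun w => (f w).2))).drop 1).headD 0,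
           ((row.filter (fun w => w ≠ v)).map (fun w => (f w).1)).foldl max tot) := by
  intro row
  induction row with
  | nil => intro tot ds; simp
  | cons w row ih =>
    intro tot ds
    by_cases hw : w = v
    · have hstep : stepA f v ((pvSrt ds).headD 0, ((pvSrt ds).drop 1).headD 0, tot) w
          = ((pvSrt ds).headD 0, ((pvSrt ds).drop 1).headD 0, tot) := by
        unfold stepA; rw [if_pos hw]
      have hfilt : (w :: row).filter (fun x => x ≠ v) = row.filter (fun x => x ≠ v) := by
        simp [hw]
      rw [List.foldl_cons, hstep, hfilt]
      exact ih tot ds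
    · have hfilt : (w :: row).filter (fun x => x ≠ v) = w :: row.filter (fun x => x ≠ v) := by
        simp [hw]
      rw [List.foldl_cons, hfilt]
      have hA : stepA f v ((pvSrt ds).headD 0, ((pvSrt ds).drop 1).headD 0, tot) w
          = ((pvSrt (ds ++ [(f w).2])).headD 0, ((pvSrt (ds ++ [(f w).2])).drop 1).headD 0,
             max tot (f w).1) := by
        rw [srt_snoc]
        have hp := ins_pair (f w).2 (h w) (pvSrt ds)
        unfold stepA
        rw [if_neg hw]
        split_ifs with h1
        · rw [if_pos h1] at hp
          simp only [Prod.mk.injEq] at hp ⊢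
          exact ⟨hp.1.symm, hp.2.symm, trivial⟩
        · rw [if_neg h1] at hp
          simp only [Prod.mk.injEq] at hp ⊢
          exact ⟨hp.1.symm, hp.2.symm, trivial⟩
      rw [hA]
      simp only [List.map_cons, List.foldl_cons]
      rw [ih (max tot (f w).1) (ds ++ [(f w).2])]
      simp [List.append_assoc]

-- the two recursions agree at every fuel value
lemma dfsA_eq_dfsB (g : List (List Int)) : ∀ (k : Nat) (u v : Int), dfsA g k u v = dfsB g k u v := by
  intro k
  induction k with
  | zero => intro u v; rfl
  | succ k ih =>
    intro u v
    have hf : (fun w => dfsB g k w u) = (fun w => dfsA g k w u) := by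
      funext w; rw [ih w u]
    simp only [dfsA, dfsB, hf, List.map_map]
    have hrel := fold_rel (fun w => dfsA g k w u) v (fun w => dfsA_snd_pos g k w u)
      ((PySem.List.pyGet? g u).getD []) 0 []
    rw [show ((pvSrt []).headD 0, ((pvSrt []).drop 1).headD 0, (0 : Int)) = ((0 : Int), (0 : Int), (0 : Int)) from rfl] at hrel
    rw [hrel]
    simp [pvSrt, Function.comp_def, Int.add_comm]

-- ===== VERDICT (by name: the statement is the Claim_ definition above) =====
theorem dfs_spec : Claim_equal_dfs := by
  intro g curMax u v _ _
  unfold Spec_dfs dfs dfs_alt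
  rw [dfsA_eq_dfsB]
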